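-- pv_equiv track=rewrite | github.com/osandoval42/algos_and_related_problems | unmastered/ctci_problems/recursion_and_dynamic_programming/8.5.py | recursMultiplyWithCache
-- ===== SOURCE A (Python) =====
-- def recursMultiplyWithCache(runningSum, factor, timesNeeded, cache):
-- 	if timesNeeded == 0:
-- 		return runningSum
--
-- 	greatestShortTime = 1
-- 	for key in cache:
-- 		if (key == timesNeeded):
-- 			return runningSum + cache[timesNeeded]
-- 		elif (key < timesNeeded and key > greatestShortTime):
-- 			greatestShortTime = key
--
-- 	return recursMultiplyWithCache(runningSum + cache[greatestShortTime], factor, timesNeeded - greatestShortTime, cache)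
-- ===== SOURCE B (Python) =====
-- def recursMultiplyWithCache(runningSum, factor, timesNeeded, cache):
--     keys = sorted(cache)
--     total = runningSum
--     t = timesNeeded
--     while t != 0:
--         # binary search: lo = rightmost insertion point of t in keys (bisect_right by hand)
--         lo, hi = 0, len(keys)
--         while lo < hi:
--             mid = (lo + hi) // 2
--             if keys[mid] <= t:
--                 lo = mid + 1
--             else:
--                 hi = mid
--         if lo > 0 and keys[lo - 1] == t:
--             return total + cache[t]
--         g = keys[lo - 1] if lo > 0 and keys[lo - 1] > 1 else 1
--         total += cache[g]
--         t -= g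
--     return total
-- ===== Notes on version B (the rewrite author's own statement) =====
-- stated objective: alternative
-- what changed: B replaces A's recursion with a per-call linear scan of all cache keys by an iterative loop over keys sorted once, using a hand-written binary search (bisect_right) per step to find the exact match or the greatest usable key; it trades a one-off sort for cheaper per-step searches.
import Mathlib
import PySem

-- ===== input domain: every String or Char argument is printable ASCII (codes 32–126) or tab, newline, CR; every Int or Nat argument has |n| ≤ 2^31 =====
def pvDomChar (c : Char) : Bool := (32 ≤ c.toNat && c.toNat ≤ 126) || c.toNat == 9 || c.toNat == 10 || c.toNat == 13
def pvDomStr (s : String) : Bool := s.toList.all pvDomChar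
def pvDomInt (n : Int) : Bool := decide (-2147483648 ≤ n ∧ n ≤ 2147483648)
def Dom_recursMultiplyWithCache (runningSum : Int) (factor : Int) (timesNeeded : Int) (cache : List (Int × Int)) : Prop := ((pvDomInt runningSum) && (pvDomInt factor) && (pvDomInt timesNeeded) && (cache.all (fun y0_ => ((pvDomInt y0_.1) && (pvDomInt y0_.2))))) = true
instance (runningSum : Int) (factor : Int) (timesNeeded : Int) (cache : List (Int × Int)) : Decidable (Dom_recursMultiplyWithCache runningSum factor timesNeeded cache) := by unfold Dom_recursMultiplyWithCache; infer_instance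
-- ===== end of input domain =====

-- B sorts the cache keys once and binary-searches per step instead of A's recursion with a
-- full linear key scan per call (objective: alternative algorithm, same exact values).

-- ===== PORT A =====
-- Python dict lookup cache[k]: first (= only, under the Nodup keys of Pre_) match; the 0
-- default is never reached on inputs admitted by Pre_ (Python would raise KeyError there).
def pvDget (cache : List (Int × Int)) (k : Int) : Int :=
  ((cache.find? (fun p => p.1 == k)).map Prod.snd).getD 0

-- shared fuel for both loop ports: on every input admitted by Pre_ the number of recursive
-- steps is at most timesNeeded (positive chains, each step subtracts ≥ 1) or at most
-- timesNeeded - k for some key k < timesNeeded (negative descent), so this fuel suffices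
-- and the fuel-0 case is unreachable there.
def pvFuel (t : Int) (cache : List (Int × Int)) : Nat :=
  t.toNat + (cache.map (fun p => (t - p.1).toNat)).sum + 1

-- A's "for key in cache" loop: returns (True, _) on an exact match, else (False, greatestShortTime)
def pvAScan (t : Int) (g : Int) : List Int → Bool × Int
  | [] => (false, g)
  | k :: ks => if k = t then (true, g) else pvAScan t (if k < t ∧ g < k then k else g) ks

def pvARec : Nat → Int → Int → Int → List (Int × Int) → Int
  | 0, rs, _, _, _ => rs
  | fuel+1, rs, f, t, cache =>
    if t = 0 then rs
    else
      match pvAScan t 1 (cache.map Prod.fst) with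
      | (true, _) => rs + pvDget cache t
      | (false, g) => pvARec fuel (rs + pvDget cache g) f (t - g) cache

def recursMultiplyWithCache (runningSum : Int) (factor : Int) (timesNeeded : Int) (cache : List (Int × Int)) : Int :=
  pvARec (pvFuel timesNeeded cache) runningSum factor timesNeeded cache

-- ===== PORT B =====
-- Source B's hand-written bisect_right inner while-loop; keys.getD mid 0 is exact for Python's
-- keys[mid] since 0 ≤ mid < hi ≤ len(keys) whenever it is evaluated.
def pvBisect (keys : List Int) (t : Int) (lo hi : Nat) : Nat :=
  if lo < hi then
    let mid := (lo + hi) / 2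
    if keys.getD mid 0 ≤ t then pvBisect keys t (mid + 1) hi
    else pvBisect keys t lo mid
  else lo
termination_by hi - lo
decreasing_by all_goals omega

-- Source B's outer while-loop, same fuel convention as port A
def pvBLoop : Nat → Int → Int → List Int → List (Int × Int) → Int
  | 0, total, _, _, _ => total
  | fuel+1, total, t, keys, cache =>
    if t = 0 then total
    else
      let lo := pvBisect keys t 0 keys.length
      if 0 < lo ∧ keys.getD (lo - 1) 0 = t then total + pvDget cache t
      else
        let g := if 0 < lo ∧ 1 < keys.getD (lo - 1) 0 then keys.getD (lo - 1) 0 else 1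
        pvBLoop fuel (total + pvDget cache g) (t - g) keys cache

def recursMultiplyWithCache_alt (runningSum : Int) (factor : Int) (timesNeeded : Int) (cache : List (Int × Int)) : Int :=
  pvBLoop (pvFuel timesNeeded cache) runningSum timesNeeded
    (PySem.List.sorted (cache.map Prod.fst) (fun x => x) false) cache

-- ===== PRECONDITION & SPEC =====
-- One-pass closed-form description of A's greedy chain for positive timesNeeded, walked over
-- the descending-sorted keys > 1: a whole run of subtractions of the same greatest key k is
-- one `% k`; when no key > 1 is left the chain decreases by 1, which succeeds iff 1 is a key.
-- descending insertion sort (structural, so Pre_ evaluates by `decide`)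
def pvInsDesc (x : Int) : List Int → List Int
  | [] => [x]
  | y :: ys => if y ≤ x then x :: y :: ys else y :: pvInsDesc x ys

def pvSortDesc : List Int → List Int
  | [] => []
  | x :: xs => pvInsDesc x (pvSortDesc xs)

def pvChain (K : List Int) : Int → List Int → Bool
  | t, [] => if t ∈ K then true else decide ((1:Int) ∈ K)
  | t, k :: rest =>
    if t ∈ K then true
    else if k < t then
      if t % k = 0 then true else pvChain K (t % k) rest
    else pvChain K t rest

-- Pre_ excludes exactly the inputs on which A raises — KeyError when the greedy chain needs a
-- key that is absent, RecursionError when timesNeeded < 0 and the descent never lands on a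
-- key — plus association lists with duplicate keys when timesNeeded ≠ 0, which a Python dict
-- cannot represent (the Nodup clause only pins down the dict model of the cache).
def Pre_recursMultiplyWithCache (runningSum : Int) (factor : Int) (timesNeeded : Int) (cache : List (Int × Int)) : Prop :=
  timesNeeded = 0 ∨
    ((cache.map Prod.fst).Nodup ∧
      ((timesNeeded < 0 ∧ (timesNeeded ∈ cache.map Prod.fst ∨
          ((1:Int) ∈ cache.map Prod.fst ∧ ∃ k ∈ cache.map Prod.fst, k < timesNeeded))) ∨
       (0 < timesNeeded ∧
        pvChain (cache.map Prod.fst) timesNeeded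
          (pvSortDesc ((cache.map Prod.fst).filter (fun k => decide (1 < k)))) = true)))
instance (runningSum : Int) (factor : Int) (timesNeeded : Int) (cache : List (Int × Int)) : Decidable (Pre_recursMultiplyWithCache runningSum factor timesNeeded cache) := by unfold Pre_recursMultiplyWithCache; infer_instance

def pvWitness_recursMultiplyWithCache : Int × Int × Int × (List (Int × Int)) := (0, 3, 6, [(2, 5)])

def Spec_recursMultiplyWithCache (runningSum : Int) (factor : Int) (timesNeeded : Int) (cache : List (Int × Int)) (out : Int) : Prop := out = recursMultiplyWithCache_alt runningSum factor timesNeeded cache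
instance (runningSum : Int) (factor : Int) (timesNeeded : Int) (cache : List (Int × Int)) (out : Int) : Decidable (Spec_recursMultiplyWithCache runningSum factor timesNeeded cache out) := by unfold Spec_recursMultiplyWithCache; infer_instance

-- ===== CLAIM (what is proved, stated in full; the proofs are below) =====
def Claim_equal_recursMultiplyWithCache : Prop := ∀ (runningSum : Int) (factor : Int) (timesNeeded : Int) (cache : List (Int × Int)), Dom_recursMultiplyWithCache runningSum factor timesNeeded cache → Pre_recursMultiplyWithCache runningSum factor timesNeeded cache → Spec_recursMultiplyWithCache runningSum factor timesNeeded cache (recursMultiplyWithCache runningSum factor timesNeeded cache)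

-- ===== LEMMAS AND PROOFS =====

-- the scan flag is true iff t occurs among the keys
theorem pvAScan_fst (t : Int) : ∀ (ks : List Int) (g : Int), (pvAScan t g ks).1 = true ↔ t ∈ ks := by
  intro ks
  induction ks with
  | nil => intro g; simp [pvAScan]
  | cons k ks ih =>
    intro g
    by_cases hk : k = t
    · simp [pvAScan, hk]
    · simp [pvAScan, hk, ih, Ne.symm hk]

-- when t is not a key, the scan result is the running maximum: ≥ g, itself g or a key < t,
-- and an upper bound for every key < t
theorem pvAScan_snd (t : Int) : ∀ (ks : List Int) (g : Int), t ∉ ks →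
    g ≤ (pvAScan t g ks).2 ∧
    ((pvAScan t g ks).2 = g ∨ ((pvAScan t g ks).2 ∈ ks ∧ (pvAScan t g ks).2 < t)) ∧
    (∀ k ∈ ks, k < t → k ≤ (pvAScan t g ks).2) := by
  intro ks
  induction ks with
  | nil => intro g _; simp [pvAScan]
  | cons k ks ih =>
    intro g hmem
    have hk : ¬ (k = t) := by intro h; exact hmem (h ▸ List.mem_cons_self ..)
    have hks : t ∉ ks := fun h => hmem (List.mem_cons_of_mem _ h)
    by_cases hcond : k < t ∧ g < k
    · have h := ih k hks
      refine ⟨?_, ?_, ?_⟩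
      · simp only [pvAScan, if_neg hk, if_pos hcond]
        have := h.1; omega
      · simp only [pvAScan, if_neg hk, if_pos hcond]
        rcases h.2.1 with h1 | h1
        · exact Or.inr ⟨by simp [h1], by omega⟩
        · exact Or.inr ⟨List.mem_cons_of_mem _ h1.1, h1.2⟩
      · intro x hx hxt
        simp only [pvAScan, if_neg hk, if_pos hcond]
        rcases List.mem_cons.mp hx with rfl | hx'
        · have := h.1; omega
        · exact h.2.2 x hx' hxt
    · have h := ih g hks
      refine ⟨?_, ?_, ?_⟩
      · simpa [pvAScan, hk, hcond] using h.1
      · simp only [pvAScan, if_neg hk, if_neg hcond]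
        rcases h.2.1 with h1 | h1
        · exact Or.inl h1
        · exact Or.inr ⟨List.mem_cons_of_mem _ h1.1, h1.2⟩
      · intro x hx hxt
        simp only [pvAScan, if_neg hk, if_neg hcond]
        rcases List.mem_cons.mp hx with rfl | hx'
        · have := h.1; omega
        · exact h.2.2 x hx' hxt

-- getD-monotonicity of a (· ≤ ·)-pairwise list
theorem pairwise_getD_mono (L : List Int) (hL : L.Pairwise (· ≤ ·)) {i j : Nat}
    (hij : i ≤ j) (hj : j < L.length) : L.getD i 0 ≤ L.getD j 0 := by
  rcases Nat.eq_or_lt_of_le hij with rfl | hlt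
  · exact le_refl _
  · have hi : i < L.length := Nat.lt_trans hlt hj
    have := (List.pairwise_iff_getElem.mp hL) i j hi hj hlt
    simpa [List.getD_eq_getElem, hi, hj] using this

-- invariant of the hand-written bisect_right, by induction on the interval width
theorem pvBisect_spec (L : List Int) (t : Int) (hL : L.Pairwise (· ≤ ·)) :
    ∀ (n : Nat) (lo hi : Nat), hi - lo ≤ n → lo ≤ hi → hi ≤ L.length →
    (∀ j, j < lo → L.getD j 0 ≤ t) → (∀ j, hi ≤ j → j < L.length → t < L.getD j 0) →
    (lo ≤ pvBisect L t lo hi ∧ pvBisect L t lo hi ≤ hi ∧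
      (∀ j, j < pvBisect L t lo hi → L.getD j 0 ≤ t) ∧
      (∀ j, pvBisect L t lo hi ≤ j → j < L.length → t < L.getD j 0)) := by
  intro n
  induction n with
  | zero =>
    intro lo hi hn hlohi hhi hlow hhigh
    have hnl : ¬ lo < hi := by omega
    rw [pvBisect, if_neg hnl]
    exact ⟨le_refl _, hlohi, hlow, by intro j hj hjl; exact hhigh j (by omega) hjl⟩
  | succ n ihn =>
    intro lo hi hn hlohi hhi hlow hhigh
    by_cases hlt : lo < hi
    · by_cases hmid : L.getD ((lo + hi) / 2) 0 ≤ t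
      · have hrec := ihn ((lo + hi) / 2 + 1) hi (by omega) (by omega) hhi
          (by intro j hj
              rcases Nat.lt_or_ge j ((lo + hi) / 2) with h | h
              · exact le_trans (pairwise_getD_mono L hL (Nat.le_of_lt h) (by omega)) hmid
              · have hje : j = (lo + hi) / 2 := by omega
                exact hje ▸ hmid)
          hhigh
        rw [pvBisect]
        simp only [if_pos hlt, if_pos hmid]
        refine ⟨?_, hrec.2.1, hrec.2.2⟩
        have := hrec.1; omega
      · have hrec := ihn lo ((lo + hi) / 2) (by omega) (by omega) (by omega)
          hlow
          (by intro j hj hjlen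
              exact lt_of_lt_of_le (lt_of_not_ge hmid) (pairwise_getD_mono L hL hj hjlen))
        rw [pvBisect]
        simp only [if_pos hlt, if_neg hmid]
        refine ⟨hrec.1, ?_, hrec.2.2.1, hrec.2.2.2⟩
        have := hrec.2.1; omega
    · rw [pvBisect, if_neg hlt]
      exact ⟨le_refl _, hlohi, hlow, by intro j hj hjl; exact hhigh j (by omega) hjl⟩

-- main loop equivalence, by induction on the common fuel; per step the two ports choose the
-- same branch and the same greatestShortTime, so they agree even when the fuel runs out
theorem pvMain : ∀ (fuel : Nat) (rs f t : Int) (cache : List (Int × Int)),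
    pvARec fuel rs f t cache =
      pvBLoop fuel rs t (PySem.List.sorted (cache.map Prod.fst) (fun x => x) false) cache := by
  intro fuel
  induction fuel with
  | zero => intro rs f t cache; rfl
  | succ n ih =>
    intro rs f t cache
    by_cases ht0 : t = 0
    · simp [pvARec, pvBLoop, ht0]
    · set keys := cache.map Prod.fst with hkeys
      set L := PySem.List.sorted keys (fun x => x) false with hLdef
      have hperm : L.Perm keys := PySem.List.sorted_perm ..
      have hpair : L.Pairwise (· ≤ ·) := by
        have := PySem.List.sorted_pairwise (xs := keys) (key := fun x => x)
        simpa using this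
      have hbis := pvBisect_spec L t hpair L.length 0 L.length (by omega) (Nat.zero_le _)
        (le_refl _) (by intro j hj; omega) (by intro j hj hjl; omega)
      set lo := pvBisect L t 0 L.length with hlo
      have idx_lt : ∀ (j : Nat), j < L.length → L.getD j 0 ≤ t → j < lo := by
        intro j hjl hle
        by_contra hge
        exact absurd hle (not_le_of_gt (hbis.2.2.2 j (by omega) hjl))
      have mem_low : ∀ m : Int, m ∈ keys → m ≤ t → 0 < lo ∧ m ≤ L.getD (lo - 1) 0 := by
        intro m hm hmt
        have hmL : m ∈ L := hperm.mem_iff.mpr hm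
        obtain ⟨j, hjl, hje⟩ := List.getElem_of_mem hmL
        have hgd : L.getD j 0 = m := by simp [List.getD_eq_getElem, hjl, hje]
        have hjlo : j < lo := idx_lt j hjl (hgd ▸ hmt)
        refine ⟨by omega, ?_⟩
        calc m = L.getD j 0 := hgd.symm
          _ ≤ L.getD (lo - 1) 0 := pairwise_getD_mono L hpair (by omega)
              (by have := hbis.2.1; omega)
      have top_le : 0 < lo → L.getD (lo - 1) 0 ≤ t := by
        intro h; exact hbis.2.2.1 (lo - 1) (by omega)
      have mem_top : 0 < lo → L.getD (lo - 1) 0 ∈ keys := by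
        intro h
        have hl : lo - 1 < L.length := by have := hbis.2.1; omega
        have hmem : L.getD (lo - 1) 0 ∈ L := by
          rw [List.getD_eq_getElem _ _ hl]; exact List.getElem_mem _
        exact hperm.mem_iff.mp hmem
      by_cases htk : t ∈ keys
      -- exact match on both sides
      · have hA : (pvAScan t 1 keys).1 = true := (pvAScan_fst t keys 1).mpr htk
        have hB := mem_low t htk (le_refl _)
        have hBt : L.getD (lo - 1) 0 = t := le_antisymm (top_le hB.1) hB.2
        have hstep : pvAScan t 1 keys = (true, (pvAScan t 1 keys).2) := by
          rw [← hA]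
        rw [pvARec, pvBLoop]
        simp only [if_neg ht0, ← hkeys]
        rw [hstep]
        simp only [← hLdef, ← hlo]
        rw [if_pos (show 0 < lo ∧ L.getD (lo - 1) 0 = t from ⟨hB.1, hBt⟩)]
      -- no exact match: both take greatestShortTime = max({1} ∪ {k ∈ keys | k < t})
      · have hscan := pvAScan_snd t keys 1 htk
        have hA : (pvAScan t 1 keys).1 = false := by
          rcases Bool.eq_false_or_eq_true (pvAScan t 1 keys).1 with h | h
          · exact absurd ((pvAScan_fst t keys 1).mp h) htk
          · exact h
        set gA := (pvAScan t 1 keys).2 with hgA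
        have hm_ne : 0 < lo → L.getD (lo - 1) 0 ≠ t := by
          intro h he; exact htk (he ▸ mem_top h)
        have hnoteq : ¬ (0 < lo ∧ L.getD (lo - 1) 0 = t) := by
          rintro ⟨h1, h2⟩; exact hm_ne h1 h2
        have hgB : (if 0 < lo ∧ 1 < L.getD (lo - 1) 0 then L.getD (lo - 1) 0 else 1) = gA := by
          by_cases hb : 0 < lo ∧ 1 < L.getD (lo - 1) 0
          · rw [if_pos hb]
            have hmk := mem_top hb.1
            have hmt : L.getD (lo - 1) 0 < t := lt_of_le_of_ne (top_le hb.1) (hm_ne hb.1)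
            have h1 : L.getD (lo - 1) 0 ≤ gA := hscan.2.2 _ hmk hmt
            have h2 : gA ≤ L.getD (lo - 1) 0 := by
              rcases hscan.2.1 with h | h
              · have := hb.2; omega
              · exact (mem_low gA h.1 (le_of_lt h.2)).2
            omega
          · rw [if_neg hb]
            by_contra hne
            have hg1 : 1 ≤ gA := hscan.1
            have hgt : 1 < gA := by omega
            rcases hscan.2.1 with h | h
            · omega
            · have hml := mem_low gA h.1 (le_of_lt h.2)
              exact hb ⟨hml.1, by omega⟩
        have hstep : pvAScan t 1 keys = (false, gA) := by
          rw [← hA]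
        rw [pvARec, pvBLoop]
        simp only [if_neg ht0, ← hkeys]
        rw [hstep]
        simp only [← hLdef, ← hlo]
        rw [if_neg hnoteq, hgB]
        exact ih (rs + pvDget cache gA) f (t - gA) cache

-- ===== VERDICT (by name: the statement is the Claim_ definition above) =====
theorem recursMultiplyWithCache_spec : Claim_equal_recursMultiplyWithCache := by
  intro rs f t cache _ _
  unfold Spec_recursMultiplyWithCache recursMultiplyWithCache recursMultiplyWithCache_alt
  exact pvMain (pvFuel t cache) rs f t cache
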